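-- pv_equiv track=rewrite | github.com/annacwu/reedprojects | homework5/down_up.py | down_up
-- ===== SOURCE A (Python) =====
-- def down_up(n):
--     x = [n]
--     y = n
--     i = n
--     while (i > 1):
--         i = y - 1
--         x.append(i)
--         y = y - 1
--     while (i < n):
--         i = y + 1
--         x.append(i)
--         y = y + 1
--     return x
-- ===== SOURCE B (Python) =====
-- def down_up(n):
--     if n < 1:
--         return [n]
--     return [1 + abs(j - (n - 1)) for j in range(2 * n - 1)]
-- ===== Notes on version B (the rewrite author's own statement) =====
-- stated objective: alternative
-- what changed: Replaces the two sequential while-loops with running counters by a single closed-form comprehension computing each element directly from its index as 1 + |j - (n-1)|.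
import Mathlib
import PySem

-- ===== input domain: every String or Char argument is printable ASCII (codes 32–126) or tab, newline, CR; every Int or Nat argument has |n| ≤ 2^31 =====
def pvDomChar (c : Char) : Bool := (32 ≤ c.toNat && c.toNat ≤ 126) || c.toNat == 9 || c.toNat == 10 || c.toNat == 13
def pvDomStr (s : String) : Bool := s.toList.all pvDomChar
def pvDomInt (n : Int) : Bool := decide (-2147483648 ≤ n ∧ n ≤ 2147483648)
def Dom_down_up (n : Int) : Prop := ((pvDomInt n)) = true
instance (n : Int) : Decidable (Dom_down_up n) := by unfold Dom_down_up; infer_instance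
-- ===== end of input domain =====

-- B replaces A's two sequential while-loops (down then up with running counters) by a
-- single closed-form comprehension 1 + |j - (n-1)| over range(2*n-1); alternative, not faster.

-- ===== PORT A =====
-- first while loop: while i > 1: i = y - 1; x.append(i); y = y - 1
-- (structural recursion on an iteration bound; the Python guard i > 1 is still tested each step)
def downUpLoop1 : Nat → List Int → Int → Int → List Int × Int × Int
  | 0, x, y, i => (x, y, i)
  | fuel + 1, x, y, i =>
    if i > 1 then downUpLoop1 fuel (x ++ [y - 1]) (y - 1) (y - 1) else (x, y, i)

-- second while loop: while i < n: i = y + 1; x.append(i); y = y + 1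
def downUpLoop2 (n : Int) : Nat → List Int → Int → Int → List Int
  | 0, x, _, _ => x
  | fuel + 1, x, y, i =>
    if i < n then downUpLoop2 n fuel (x ++ [y + 1]) (y + 1) (y + 1) else x

def down_up (n : Int) : List Int :=
  let s := downUpLoop1 (n - 1).toNat [n] n n
  downUpLoop2 n (n - s.2.2).toNat s.1 s.2.1 s.2.2

-- ===== PORT B =====
def down_up_alt (n : Int) : List Int :=
  if n < 1 then [n]
  else (PySem.List.pyRange 0 (2 * n - 1) 1).map (fun j => 1 + |j - (n - 1)|)

-- ===== PRECONDITION & SPEC =====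
def Spec_down_up (n : Int) (out : List Int) : Prop := out = down_up_alt n
instance (n : Int) (out : List Int) : Decidable (Spec_down_up n out) := by unfold Spec_down_up; infer_instance

-- ===== CLAIM (what is proved, stated in full; the proofs are below) =====
def Claim_equal_down_up : Prop := ∀ (n : Int), Dom_down_up n → Spec_down_up n (down_up n)

-- ===== LEMMAS AND PROOFS =====

-- descending list [k, k-1, …, 1]
def descN : Nat → List Int
  | 0 => []
  | k + 1 => ((k : Int) + 1) :: descN k

-- ascending list [y+1, y+2, …, y+k]
def ascN (y : Int) : Nat → List Int
  | 0 => []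
  | k + 1 => (y + 1) :: ascN (y + 1) k

theorem descN_length (k : Nat) : (descN k).length = k := by
  induction k with
  | zero => rfl
  | succ k ih => simp [descN, ih]

theorem ascN_length (y : Int) (k : Nat) : (ascN y k).length = k := by
  induction k generalizing y with
  | zero => rfl
  | succ k ih => simp [ascN, ih]

theorem descN_get (k t : Nat) (ht : t < k) (h : t < (descN k).length) :
    (descN k)[t] = (k : Int) - t := by
  induction k generalizing t with
  | zero => omega
  | succ k ih =>
    cases t with
    | zero => simp [descN]
    | succ t =>
      have ht' : t < k := by omega
      simp only [descN, List.getElem_cons_succ]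
      rw [ih t ht']
      push_cast; ring

theorem ascN_get (k : Nat) (y : Int) (t : Nat) (ht : t < k) (h : t < (ascN y k).length) :
    (ascN y k)[t] = y + t + 1 := by
  induction k generalizing y t with
  | zero => omega
  | succ k ih =>
    cases t with
    | zero => simp [ascN]
    | succ t =>
      have ht' : t < k := by omega
      simp only [ascN, List.getElem_cons_succ]
      rw [ih (y + 1) t ht' (by rw [ascN_length]; omega)]
      push_cast; ring

theorem down_up_eq (n : Int) :
    down_up n = downUpLoop2 n (n - (downUpLoop1 (n - 1).toNat [n] n n).2.2).toNat
      (downUpLoop1 (n - 1).toNat [n] n n).1 (downUpLoop1 (n - 1).toNat [n] n n).2.1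
      (downUpLoop1 (n - 1).toNat [n] n n).2.2 := rfl

theorem loop1_closed (k : Nat) (x : List Int) (y : Int) (hy : y = (k : Int) + 1) :
    downUpLoop1 k x y y = (x ++ descN k, 1, 1) := by
  subst hy
  induction k generalizing x with
  | zero => rw [downUpLoop1]; simp [descN]
  | succ k ih =>
    rw [downUpLoop1]
    rw [if_pos (by push_cast; omega)]
    have e : (((k : Nat) + 1 : Nat) : Int) + 1 - 1 = (k : Int) + 1 := by push_cast; ring
    rw [e, ih]
    simp [descN]

theorem loop2_closed (k : Nat) (x : List Int) (y n : Int) (hn : n = y + k) :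
    downUpLoop2 n k x y y = x ++ ascN y k := by
  subst hn
  induction k generalizing x y with
  | zero => rw [downUpLoop2]; simp [ascN]
  | succ k ih =>
    rw [downUpLoop2]
    rw [if_pos (by push_cast; omega)]
    have e : (y : Int) + ((k : Nat) + 1 : Nat) = (y + 1) + (k : Nat) := by push_cast; ring
    rw [show downUpLoop2 (y + ((k : Nat) + 1 : Nat)) k (x ++ [y + 1]) (y + 1) (y + 1)
          = downUpLoop2 ((y + 1) + (k : Nat)) k (x ++ [y + 1]) (y + 1) (y + 1) by rw [← e]]
    rw [ih]
    simp [ascN]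

theorem down_up_pos (m : Nat) :
    down_up ((m : Int) + 1) = ((m : Int) + 1) :: (descN m ++ ascN 1 m) := by
  rw [down_up_eq]
  rw [show (((m : Int) + 1) - 1).toNat = m from by omega]
  rw [loop1_closed m [(m : Int) + 1] ((m : Int) + 1) rfl]
  show downUpLoop2 ((m : Int) + 1) (((m : Int) + 1) - 1).toNat ([(m : Int) + 1] ++ descN m) 1 1 = _
  rw [show (((m : Int) + 1) - 1).toNat = m from by omega]
  rw [loop2_closed m ([(m : Int) + 1] ++ descN m) 1 ((m : Int) + 1) (by ring)]
  simp

theorem alt_pos (m : Nat) :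
    down_up_alt ((m : Int) + 1) = ((m : Int) + 1) :: (descN m ++ ascN 1 m) := by
  unfold down_up_alt
  rw [if_neg (by omega)]
  have hr : (2 * ((m : Int) + 1) - 1) = ((2 * m + 1 : Nat) : Int) := by push_cast; ring
  rw [hr, PySem.List.pyRange_zero_natCast]
  apply List.ext_getElem
  · simp [descN_length, ascN_length]; omega
  · intro t h1 h2
    simp only [List.getElem_map, List.getElem_range]
    have hlen : t < 2 * m + 1 := by simpa using h1
    rcases Nat.lt_or_ge t 1 with ht | ht
    · interval_cases t
      simp; omega
    · obtain ⟨u, rfl⟩ : ∃ u, t = u + 1 := ⟨t - 1, by omega⟩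
      rcases Nat.lt_or_ge u m with ht2 | ht2
      · have htd : u < (descN m).length := by rw [descN_length]; omega
        rw [List.getElem_cons_succ, List.getElem_append_left htd]
        rw [descN_get m u ht2 htd]
        have : |((u + 1 : Nat) : Int) - ((m : Int) + 1 - 1)| = (m : Int) - u - 1 := by
          rw [abs_of_nonpos (by push_cast; omega)]; push_cast; ring
        rw [this]; ring
      · have htd : (descN m).length ≤ u := by rw [descN_length]; omega
        rw [List.getElem_cons_succ, List.getElem_append_right htd]
        rw [ascN_get m 1 (u - (descN m).length)
              (by rw [descN_length]; omega) (by rw [ascN_length, descN_length]; omega)]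
        rw [descN_length]
        have : |((u + 1 : Nat) : Int) - ((m : Int) + 1 - 1)| = ((u : Nat) : Int) - m + 1 := by
          rw [abs_of_nonneg (by push_cast; omega)]; push_cast; ring
        rw [this]
        rw [Nat.cast_sub ht2]
        ring

-- ===== VERDICT (by name: the statement is the Claim_ definition above) =====
theorem down_up_spec : Claim_equal_down_up := by
  intro n _
  unfold Spec_down_up
  by_cases hn : n ≤ 0
  · rw [down_up_eq]
    rw [show (n - 1).toNat = 0 from by omega]
    show downUpLoop2 n (n - n).toNat [n] n n = _
    rw [show (n - n).toNat = 0 from by simp]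
    show [n] = _
    unfold down_up_alt
    rw [if_pos (by omega)]
  · obtain ⟨m, rfl⟩ : ∃ m : Nat, n = (m : Int) + 1 := ⟨(n - 1).toNat, by omega⟩
    rw [down_up_pos, alt_pos]
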